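-- pv_equiv track=rewrite | github.com/marti-dotcom/intersection-and-union | mycode.py | find_unions
-- ===== SOURCE A (Python) =====
-- def find_unions(intervals1, intervals2): #merges the two files from min of one file to max of another, You want to group and merge intervals by name.
--
--     by_name = {}        #starts an empty dictionary to store intervals by feature name
--     for chrom, start, end, name in intervals1 + intervals2:       #Loops through all intervals in both intervals1 and intervals2.
--         if name not in by_name:
--             by_name[name] = {'chrom': chrom, 'start': start, 'end': end, 'count': 1}
--         else:        #but if the name is already in the dictionary
--             entry = by_name[name]  #you fetch the one you currently already have
--
--             if entry['chrom'] != chrom:   #It checks if the chromosome is the same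
--                 entry['invalid'] = True   #if not, it marks as invalid
--             else:
--                 entry['start'] = min(entry['start'], start)  #otherwise if the chromosome is the same
--                 entry['end']   = max(entry['end'],   end) #Otherwise, it extends the start and end to include the current interval’s range
--             entry['count'] += 1
--     results = []    #Loops through the dictionary and only adds valid intervals to the results list
--
--     for name, entry in by_name.items():
--         if entry.get('invalid'): #It skips any intervals that were marked as invalid (those that span different chromosomes)
--             continue
--         results.append((entry['chrom'], entry['start'], entry['end'], name))
--     return results
-- ===== SOURCE B (Python) =====
-- def find_unions(intervals1, intervals2):
--     # Collect each name's raw (chrom, start, end) tuples first, then reduce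
--     # whole groups at once: keep a group only if all its chroms agree.
--     groups = {}
--     for chrom, start, end, name in intervals1 + intervals2:
--         groups.setdefault(name, []).append((chrom, start, end))
--     return [(items[0][0],
--              min(s for _, s, _ in items),
--              max(e for _, _, e in items),
--              name)
--             for name, items in groups.items()
--             if all(c == items[0][0] for c, _, _ in items)]
-- ===== Notes on version B (the rewrite author's own statement) =====
-- stated objective: alternative
-- what changed: B first groups all (chrom,start,end) tuples per name into an ordered dict in one pass, then reduces each whole group at once (include iff all chroms equal, take min of starts / max of ends), instead of A's inline running aggregates with invalid/count bookkeeping; the unused count is dropped.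
import Mathlib
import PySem

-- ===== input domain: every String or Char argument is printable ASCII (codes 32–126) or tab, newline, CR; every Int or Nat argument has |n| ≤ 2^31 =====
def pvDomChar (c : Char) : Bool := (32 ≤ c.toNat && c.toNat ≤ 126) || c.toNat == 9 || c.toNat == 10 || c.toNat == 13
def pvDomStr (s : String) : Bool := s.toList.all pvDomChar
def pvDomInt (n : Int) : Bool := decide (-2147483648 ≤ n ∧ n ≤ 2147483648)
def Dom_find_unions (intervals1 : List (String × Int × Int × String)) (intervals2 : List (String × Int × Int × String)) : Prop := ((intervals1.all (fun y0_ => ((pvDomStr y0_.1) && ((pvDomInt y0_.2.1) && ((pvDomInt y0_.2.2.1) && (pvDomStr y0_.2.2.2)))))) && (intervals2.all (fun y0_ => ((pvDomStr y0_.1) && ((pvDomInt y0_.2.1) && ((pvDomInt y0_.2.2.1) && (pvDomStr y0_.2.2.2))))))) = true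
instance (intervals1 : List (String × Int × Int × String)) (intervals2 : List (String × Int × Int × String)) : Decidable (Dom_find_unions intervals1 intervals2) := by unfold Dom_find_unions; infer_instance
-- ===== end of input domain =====

-- B groups each name's (chrom, start, end) tuples first and reduces whole groups afterwards
-- (keep iff all chroms agree; min of starts / max of ends), replacing A's inline running
-- aggregates with invalid/count bookkeeping; same cost, different decomposition ("alternative").

-- ===== PORT A =====
-- the per-name mutable dict {'chrom':…,'start':…,'end':…,'count':…,['invalid':True]} of A,
-- as a record; the optional 'invalid' key (absent = falsy in entry.get) is a Bool field.
structure EntryA where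
  chrom : String
  start : Int
  stop : Int
  count : Int
  invalid : Bool
deriving DecidableEq, Repr

-- the body of A's first loop for an already-present name (mutates the fetched entry)
def updEntryA (e : EntryA) (chrom : String) (start stop : Int) : EntryA :=
  let e' := if e.chrom ≠ chrom then { e with invalid := true }
            else { e with start := min e.start start, stop := max e.stop stop }
  { e' with count := e'.count + 1 }

-- A's first loop, one interval
def stepA (d : PySem.Dict String EntryA) (iv : String × Int × Int × String) : PySem.Dict String EntryA :=
  let (chrom, start, stop, name) := iv
  match d.get? name with
  | none => d.insert name ⟨chrom, start, stop, 1, false⟩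
  | some entry => d.insert name (updEntryA entry chrom start stop)

def find_unions (intervals1 : List (String × Int × Int × String)) (intervals2 : List (String × Int × Int × String)) : List (String × Int × Int × String) :=
  let by_name := (intervals1 ++ intervals2).foldl stepA PySem.Dict.empty
  by_name.items.foldl
    (fun results p =>
      let (name, entry) := p
      if entry.invalid then results
      else results ++ [(entry.chrom, entry.start, entry.stop, name)])
    []

-- ===== PORT B =====
-- B's first loop: groups.setdefault(name, []).append((chrom, start, end))
def stepB (d : PySem.Dict String (List (String × Int × Int))) (iv : String × Int × Int × String) : PySem.Dict String (List (String × Int × Int)) :=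
  let (chrom, start, stop, name) := iv
  d.modify name [] (fun l => l ++ [(chrom, start, stop)])

-- one element of B's output comprehension: group kept iff every chrom equals the first
def summarizeB (p : String × List (String × Int × Int)) : Option (String × Int × Int × String) :=
  match p with
  | (_, []) => none  -- unreachable: every group collects at least the interval that created it
  | (name, h :: t) =>
    if (h :: t).all (fun q => q.1 == h.1) then
      some (h.1, t.foldl (fun m q => min m q.2.1) h.2.1, t.foldl (fun m q => max m q.2.2) h.2.2, name)
    else none

def find_unions_alt (intervals1 : List (String × Int × Int × String)) (intervals2 : List (String × Int × Int × String)) : List (String × Int × Int × String) :=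
  let groups := (intervals1 ++ intervals2).foldl stepB PySem.Dict.empty
  groups.items.filterMap summarizeB

-- ===== PRECONDITION & SPEC =====
def Spec_find_unions (intervals1 : List (String × Int × Int × String)) (intervals2 : List (String × Int × Int × String)) (out : List (String × Int × Int × String)) : Prop := out = find_unions_alt intervals1 intervals2
instance (intervals1 : List (String × Int × Int × String)) (intervals2 : List (String × Int × Int × String)) (out : List (String × Int × Int × String)) : Decidable (Spec_find_unions intervals1 intervals2 out) := by unfold Spec_find_unions; infer_instance

-- ===== CLAIM (what is proved, stated in full; the proofs are below) =====
def Claim_equal_find_unions : Prop := ∀ (intervals1 : List (String × Int × Int × String)) (intervals2 : List (String × Int × Int × String)), Dom_find_unions intervals1 intervals2 → Spec_find_unions intervals1 intervals2 (find_unions intervals1 intervals2)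

-- ===== LEMMAS AND PROOFS =====

-- what A's running entry amounts to, replayed over a group's tuple list
def abstr : List (String × Int × Int) → EntryA
  | [] => ⟨"", 0, 0, 0, false⟩  -- never used: groups are nonempty
  | (c, s, e) :: t => t.foldl (fun acc q => updEntryA acc q.1 q.2.1 q.2.2) ⟨c, s, e, 1, false⟩

-- the invariant tying A's dict to B's dict during the first loop
def DictRel (dA : PySem.Dict String EntryA) (dB : PySem.Dict String (List (String × Int × Int))) : Prop :=
  dA.items = dB.items.map (fun p => (p.1, abstr p.2)) ∧
  (∀ p ∈ dB.items, p.2 ≠ []) ∧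
  (dB.items.map Prod.fst).Nodup

theorem abstr_snoc (l : List (String × Int × Int)) (hl : l ≠ []) (c : String) (s e : Int) :
    abstr (l ++ [(c, s, e)]) = updEntryA (abstr l) c s e := by
  cases l with
  | nil => exact absurd rfl hl
  | cons h t =>
    obtain ⟨c0, s0, e0⟩ := h
    simp [abstr, List.foldl_append]

theorem eq_of_mem_keys_nodup {α β : Type} {l : List (α × β)} (hnd : (l.map Prod.fst).Nodup)
    {p q : α × β} (hp : p ∈ l) (hq : q ∈ l) (h : p.1 = q.1) : p = q := by
  induction l with
  | nil => cases hp
  | cons x xs ih =>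
    rw [List.map_cons, List.nodup_cons] at hnd
    rcases List.mem_cons.mp hp with hp1 | hp1 <;> rcases List.mem_cons.mp hq with hq1 | hq1
    · rw [hp1, hq1]
    · subst hp1
      exact absurd (show p.1 ∈ xs.map Prod.fst by rw [h]; exact List.mem_map_of_mem hq1) hnd.1
    · subst hq1
      exact absurd (show q.1 ∈ xs.map Prod.fst by rw [← h]; exact List.mem_map_of_mem hp1) hnd.1
    · exact ih hnd.2 hp1 hq1

theorem dictRel_step (dA : PySem.Dict String EntryA) (dB : PySem.Dict String (List (String × Int × Int)))
    (h : DictRel dA dB) (iv : String × Int × Int × String) : DictRel (stepA dA iv) (stepB dB iv) := by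
  obtain ⟨c, s, e, n⟩ := iv
  obtain ⟨hitems, hne, hnd⟩ := h
  have hcontains : dA.contains n = dB.contains n := by
    simp only [PySem.Dict.contains, hitems, List.any_map]; rfl
  by_cases hc : dB.contains n = true
  · -- key already present in both dicts: both overwrite in place
    have hcA : dA.contains n = true := by rw [hcontains]; exact hc
    obtain ⟨pr, hfind⟩ : ∃ pr, dB.items.find? (fun p => p.1 == n) = some pr := by
      simp only [PySem.Dict.contains, List.any_eq_true] at hc
      obtain ⟨p, hp, hpe⟩ := hc
      exact Option.isSome_iff_exists.mp (List.find?_isSome.mpr ⟨p, hp, hpe⟩)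
    have hprn : pr.1 = n := by simpa using List.find?_some hfind
    have hprmem : pr ∈ dB.items := List.mem_of_find?_eq_some hfind
    have hprne : pr.2 ≠ [] := hne pr hprmem
    have hgetA : dA.get? n = some (abstr pr.2) := by
      simp only [PySem.Dict.get?, hitems, List.find?_map]
      rw [show ((fun p : String × EntryA => p.1 == n) ∘
            (fun p : String × List (String × Int × Int) => (p.1, abstr p.2)))
          = (fun p : String × List (String × Int × Int) => p.1 == n) from rfl, hfind]
      rfl
    have hgB : dB.getD n [] = pr.2 := by simp [PySem.Dict.getD, PySem.Dict.get?, hfind]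
    refine ⟨?_, ?_, ?_⟩
    · simp only [stepA, stepB, PySem.Dict.modify, hgetA, hgB,
        PySem.Dict.insert, hc, hcA, if_pos, hitems]
      rw [List.map_map, List.map_map]
      apply List.map_congr_left
      intro p hp
      by_cases hpn : p.1 = n
      · have : p = pr := eq_of_mem_keys_nodup hnd hp hprmem (by rw [hpn, hprn])
        subst this
        simp [Function.comp, hprn, abstr_snoc p.2 hprne c s e]
      · simp [Function.comp, hpn]
    · intro p hp
      simp only [stepB, PySem.Dict.modify, PySem.Dict.insert, hc, if_pos, List.mem_map] at hp
      obtain ⟨q, hq, hqe⟩ := hp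
      by_cases hqn : q.1 = n
      · subst hqe; simp [hqn]
      · subst hqe; simp [hqn]; exact hne q hq
    · simp only [stepB, PySem.Dict.modify, PySem.Dict.insert, hc, if_pos]
      rw [List.map_map]
      have : (Prod.fst ∘ fun p : String × List (String × Int × Int) =>
          if (p.1 == n) = true then (n, dB.getD n [] ++ [(c, s, e)]) else p) = Prod.fst := by
        funext p
        by_cases hpn : p.1 = n <;> simp [hpn]
      rw [this]; exact hnd
  · -- new key: both dicts append at the end
    have hcA : dA.contains n = false := by
      rw [hcontains]; exact Bool.not_eq_true _ ▸ hc
    have hc' : ∀ p ∈ dB.items, ¬ p.1 = n := by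
      simp only [PySem.Dict.contains] at hc
      rw [Bool.not_eq_true] at hc
      have := List.any_eq_false.mp hc
      intro p hp
      simpa using this p hp
    have hgetA : dA.get? n = none := by
      simp only [PySem.Dict.get?, hitems, List.find?_map]
      rw [List.find?_eq_none.mpr]
      · rfl
      · intro p hp; simpa using hc' p hp
    have hgB : dB.getD n [] = [] := by
      simp only [PySem.Dict.getD, PySem.Dict.get?]
      rw [List.find?_eq_none.mpr]
      · rfl
      · intro p hp; simpa using hc' p hp
    have hnmem : n ∉ dB.items.map Prod.fst := by
      simp only [List.mem_map]
      rintro ⟨p, hp, hpe⟩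
      exact hc' p hp hpe
    have hcB : dB.contains n = false := Bool.not_eq_true _ ▸ hc
    refine ⟨?_, ?_, ?_⟩
    · simp only [stepA, stepB, PySem.Dict.modify, hgetA, hgB, PySem.Dict.insert, hcB, hcA,
        Bool.false_eq_true, if_false, hitems]
      simp [abstr]
    · intro p hp
      simp only [stepB, PySem.Dict.modify, PySem.Dict.insert, hcB, hgB, Bool.false_eq_true,
        if_false, List.mem_append] at hp
      rcases hp with hp | hp
      · exact hne p hp
      · simp only [List.mem_singleton] at hp; subst hp; simp
    · simp only [stepB, PySem.Dict.modify, PySem.Dict.insert, hcB, hgB, Bool.false_eq_true,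
        if_false, List.map_append]
      simp [List.nodup_append, hnd]
      exact fun a x hx => hc' (a, x) hx

theorem dictRel_foldl (L : List (String × Int × Int × String)) :
    DictRel (L.foldl stepA PySem.Dict.empty) (L.foldl stepB PySem.Dict.empty) := by
  suffices h : ∀ dA dB, DictRel dA dB → DictRel (L.foldl stepA dA) (L.foldl stepB dB) by
    exact h _ _ ⟨rfl, by simp [PySem.Dict.empty], by simp [PySem.Dict.empty]⟩
  induction L with
  | nil => intro dA dB h; exact h
  | cons x xs ih => intro dA dB h; exact ih _ _ (dictRel_step dA dB h x)

-- A's running entry over a group, characterised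
theorem entry_foldl (t : List (String × Int × Int)) : ∀ (e : EntryA),
    (t.foldl (fun acc q => updEntryA acc q.1 q.2.1 q.2.2) e).chrom = e.chrom ∧
    (t.foldl (fun acc q => updEntryA acc q.1 q.2.1 q.2.2) e).invalid
      = (e.invalid || !(t.all (fun q => q.1 == e.chrom))) ∧
    (e.invalid = false → t.all (fun q => q.1 == e.chrom) = true →
      (t.foldl (fun acc q => updEntryA acc q.1 q.2.1 q.2.2) e).start
          = t.foldl (fun m q => min m q.2.1) e.start ∧
      (t.foldl (fun acc q => updEntryA acc q.1 q.2.1 q.2.2) e).stop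
          = t.foldl (fun m q => max m q.2.2) e.stop) := by
  induction t with
  | nil => intro e; simp
  | cons q t ih =>
    intro e
    by_cases hq : q.1 = e.chrom
    · have hupd : updEntryA e q.1 q.2.1 q.2.2
          = { e with start := min e.start q.2.1, stop := max e.stop q.2.2, count := e.count + 1 } := by
        simp [updEntryA, hq]
      obtain ⟨ih1, ih2, ih3⟩ := ih { e with start := min e.start q.2.1, stop := max e.stop q.2.2, count := e.count + 1 }
      refine ⟨?_, ?_, ?_⟩
      · simp only [List.foldl_cons, hupd]; exact ih1
      · simp only [List.foldl_cons, hupd]; rw [ih2]; simp [hq]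
      · intro hinv hall
        simp only [List.all_cons, Bool.and_eq_true] at hall
        obtain ⟨h3a, h3b⟩ := ih3 hinv (by simpa using hall.2)
        constructor
        · simp only [List.foldl_cons, hupd]; exact h3a
        · simp only [List.foldl_cons, hupd]; exact h3b
    · have hq' : e.chrom ≠ q.1 := fun h => hq h.symm
      have hupd : updEntryA e q.1 q.2.1 q.2.2 = { e with invalid := true, count := e.count + 1 } := by
        simp [updEntryA, hq']
      obtain ⟨ih1, ih2, _⟩ := ih { e with invalid := true, count := e.count + 1 }
      refine ⟨?_, ?_, ?_⟩
      · simp only [List.foldl_cons, hupd]; exact ih1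
      · simp only [List.foldl_cons, hupd]; rw [ih2]; simp [hq]
      · intro _ hall
        simp only [List.all_cons, Bool.and_eq_true] at hall
        exact absurd hall.1 (by simpa using hq)

-- A's second loop agrees with B's comprehension, elementwise
theorem collect_eq (p : String × List (String × Int × Int)) (hp : p.2 ≠ []) :
    (if (abstr p.2).invalid then none
     else some ((abstr p.2).chrom, (abstr p.2).start, (abstr p.2).stop, p.1)) = summarizeB p := by
  obtain ⟨n, l⟩ := p
  cases l with
  | nil => exact absurd rfl hp
  | cons h t =>
    obtain ⟨c0, s0, e0⟩ := h
    obtain ⟨h1, h2, h3⟩ := entry_foldl t ⟨c0, s0, e0, 1, false⟩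
    by_cases hall : (t.all fun q => q.1 == c0) = true
    · obtain ⟨h3a, h3b⟩ := h3 rfl hall
      simp only [summarizeB, abstr]
      rw [h1, h2, h3a, h3b]
      simp only [List.all_cons, beq_self_eq_true, Bool.true_and]
      simp [hall]
    · simp only [summarizeB, abstr]
      rw [h2]
      simp only [List.all_cons, beq_self_eq_true, Bool.true_and]
      simp [Bool.not_eq_true _ ▸ hall]

theorem foldl_collect (L : List (String × List (String × Int × Int)))
    (hne : ∀ p ∈ L, p.2 ≠ []) (acc : List (String × Int × Int × String)) :
    (L.map (fun p => (p.1, abstr p.2))).foldl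
      (fun results p =>
        let (name, entry) := p
        if entry.invalid then results
        else results ++ [(entry.chrom, entry.start, entry.stop, name)]) acc
    = acc ++ L.filterMap summarizeB := by
  induction L generalizing acc with
  | nil => simp
  | cons p L ih =>
    have hp := hne p (List.mem_cons_self)
    have hrest : ∀ q ∈ L, q.2 ≠ [] := fun q hq => hne q (List.mem_cons_of_mem p hq)
    have hc := collect_eq p hp
    simp only [List.map_cons, List.foldl_cons, List.filterMap_cons]
    by_cases hinv : (abstr p.2).invalid
    · rw [if_pos hinv]
      rw [ih hrest]
      rw [← hc]
      simp [hinv]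
    · rw [if_neg hinv]
      rw [ih hrest]
      rw [← hc]
      simp [hinv]

theorem find_unions_spec : Claim_equal_find_unions := by
  intro i1 i2 _
  obtain ⟨hitems, hne, _⟩ := dictRel_foldl (i1 ++ i2)
  simp only [Spec_find_unions, find_unions, find_unions_alt]
  rw [hitems, foldl_collect _ hne]
  simp
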